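-- pv_equiv track=rewrite | github.com/menisadi/pydp | src/examples.py | bulk_quality_minmax
-- ===== SOURCE A (Python) =====
-- from collections import deque
--
-- def bulk_quality_minmax(data, domain):
--     """
--     sensitivity-1 bulk quality function
--     used to find a minmax or median for the data
--     bulk_quality_minmax( data , domain )
--     :return: the minimum between the amount of data above the element and the data below
--     """
--     greater_than = len(data)
--     less_than = 0
--     domain_que = deque(sorted(data))
--     qualities = []
--     data_next = min(domain) - 1
--     while len(domain_que) > 0:
--         data_prev = data_next
--         data_next = domain_que.popleft()
--         qualities.append([min(greater_than, less_than)
--                           for i in domain if data_prev < i <= data_next])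
--         greater_than -= 1
--         less_than += 1
--     qualities.append([min(greater_than, less_than)
--                       for i in domain if data_next < i])
--     # qualities is a list of lists of qualities so:
--     # return flatted qualities list
--     return [item for sub_list in qualities for item in sub_list]
-- ===== SOURCE B (Python) =====
-- def bulk_quality_minmax(data, domain):
--     """Sort once, then sweep the sorted domain with a moving pointer into sorted data."""
--     sorted_data = sorted(data)
--     n = len(sorted_data)
--     qualities = []
--     below = 0
--     for v in sorted(domain):
--         while below < n and sorted_data[below] < v:
--             below += 1
--         qualities.append(min(below, n - below))
--     return qualities
-- ===== Notes on version B (the rewrite author's own statement) =====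
-- stated objective: faster
-- what changed: A pops each sorted data point and rescans the whole domain per bucket (O(N*D)); B sorts data and domain once and sweeps the sorted domain with a single moving pointer into the sorted data, emitting min(below, n-below) per domain point.
import Mathlib
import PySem

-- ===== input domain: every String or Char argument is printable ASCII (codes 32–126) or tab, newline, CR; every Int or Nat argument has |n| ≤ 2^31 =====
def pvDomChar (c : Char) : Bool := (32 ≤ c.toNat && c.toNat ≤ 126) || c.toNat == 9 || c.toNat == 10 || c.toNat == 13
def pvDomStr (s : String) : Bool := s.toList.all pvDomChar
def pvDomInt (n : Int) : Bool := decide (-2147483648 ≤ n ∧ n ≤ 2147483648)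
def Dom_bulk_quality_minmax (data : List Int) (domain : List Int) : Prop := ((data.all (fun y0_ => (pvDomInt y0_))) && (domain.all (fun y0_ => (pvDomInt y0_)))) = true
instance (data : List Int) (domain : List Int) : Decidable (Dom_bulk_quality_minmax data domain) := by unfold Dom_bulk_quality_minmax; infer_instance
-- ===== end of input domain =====

-- B replaces A's per-data-point rescan of the whole domain by a one-pointer sweep over the
-- sorted domain (objective: faster). Proved: same return value whenever domain ≠ [].

-- ===== PORT A =====
-- the while loop: pop the front of the sorted-data queue, collect the bucket, step the counters
def aLoop (domain : List Int) : List Int → Int → Int → Int → List (List Int) → (List (List Int) × Int × Int × Int)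
  | [], gt, lt, dn, quals => (quals, gt, lt, dn)
  | x :: rest, gt, lt, dn, quals =>
      aLoop domain rest (gt - 1) (lt + 1) x
        (quals ++ [(domain.filter (fun i => decide (dn < i) && decide (i ≤ x))).map (fun _ => min gt lt)])

def bulk_quality_minmax (data : List Int) (domain : List Int) : List Int :=
  let gt : Int := data.length
  let lt : Int := 0
  let que := PySem.List.sorted data (fun x => x) false
  match PySem.List.min? domain (fun x => x) with
  | none => []   -- Python raises ValueError here; excluded by Pre_
  | some m =>
    let r := aLoop domain que gt lt (m - 1) []
    (r.1 ++ [(domain.filter (fun i => decide (r.2.2.2 < i))).map (fun _ => min r.2.1 r.2.2.1)]).flatten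

-- ===== PORT B =====
-- the inner 'while below < n and sorted_data[below] < v' loop; rem is the suffix of the sorted
-- data starting at index below (rem = [] ↔ below = n, rem.head = sorted_data[below])
def bAdvance (v : Int) : List Int → Int → (List Int × Int)
  | [], below => ([], below)
  | x :: rest, below => if x < v then bAdvance v rest (below + 1) else (x :: rest, below)

-- the 'for v in sorted(domain)' loop
def bGo (n : Int) : List Int → List Int → Int → List Int → List Int
  | [], _, _, quals => quals
  | v :: vs, rem, below, quals =>
      let p := bAdvance v rem below
      bGo n vs p.1 p.2 (quals ++ [min p.2 (n - p.2)])

def bulk_quality_minmax_alt (data : List Int) (domain : List Int) : List Int :=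
  let sd := PySem.List.sorted data (fun x => x) false
  let n : Int := sd.length
  bGo n (PySem.List.sorted domain (fun x => x) false) sd 0 []

-- ===== PRECONDITION & SPEC =====
-- Pre_ excludes exactly the empty domain, on which A's min(domain) raises ValueError.
def Pre_bulk_quality_minmax (data : List Int) (domain : List Int) : Prop := domain ≠ []
instance (data : List Int) (domain : List Int) : Decidable (Pre_bulk_quality_minmax data domain) := by unfold Pre_bulk_quality_minmax; infer_instance
def pvWitness_bulk_quality_minmax : List Int × List Int := ([3, 1, 2], [0, 2, 4])

def Spec_bulk_quality_minmax (data : List Int) (domain : List Int) (out : List Int) : Prop := out = bulk_quality_minmax_alt data domain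
instance (data : List Int) (domain : List Int) (out : List Int) : Decidable (Spec_bulk_quality_minmax data domain out) := by unfold Spec_bulk_quality_minmax; infer_instance

-- ===== CLAIM (what is proved, stated in full; the proofs are below) =====
def Claim_equal_bulk_quality_minmax : Prop := ∀ (data : List Int) (domain : List Int), Dom_bulk_quality_minmax data domain → Pre_bulk_quality_minmax data domain → Spec_bulk_quality_minmax data domain (bulk_quality_minmax data domain)


-- ===== LEMMAS AND PROOFS =====

-- number of data points strictly below v
def cnt (sd : List Int) (v : Int) : Nat := sd.countP (fun x => decide (x < v))

-- the quality at a point with k data points strictly below it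
def fq (n : Int) (k : Nat) : Int := min (k : Int) (n - k)

-- the k-values (data points strictly below) of the domain points, grouped bucket by bucket
-- in increasing k -- A's emission order
def ksOf (domain sd : List Int) (a b : Nat) : List Nat :=
  (List.range' a b).flatMap (fun k => List.replicate ((domain.filter (fun v => cnt sd v == k)).length) k)

-- ===== B side =====
theorem bAdvance_spec (v : Int) : ∀ (rem : List Int) (j : Int),
    bAdvance v rem j = (rem.dropWhile (fun x => decide (x < v)), j + (rem.takeWhile (fun x => decide (x < v))).length)
  | [], j => by simp [bAdvance]
  | x :: rest, j => by
    by_cases h : x < v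
    · simp [bAdvance, h, bAdvance_spec v rest (j+1)]
      ring
    · simp [bAdvance, h]

theorem countP_dropWhile_zero (v : Int) : ∀ (rem : List Int), rem.Pairwise (· ≤ ·) →
    (rem.dropWhile (fun x => decide (x < v))).countP (fun x => decide (x < v)) = 0
  | [], _ => by simp
  | x :: rest, hp => by
    rcases List.pairwise_cons.1 hp with ⟨hx, hrest⟩
    by_cases h : x < v
    · simpa [List.dropWhile_cons, h] using countP_dropWhile_zero v rest hrest
    · simp only [List.dropWhile_cons, h, decide_false]
      apply List.countP_eq_zero.2
      intro a ha
      rcases List.mem_cons.1 ha with rfl | ha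
      · simpa using h
      · have := hx a ha; simp; omega

theorem bGo_spec (n : Int) : ∀ (vs pre rem quals : List Int),
    (pre ++ rem).Pairwise (· ≤ ·) → vs.Pairwise (· ≤ ·) →
    (∀ p ∈ pre, ∀ v ∈ vs, p < v) →
    bGo n vs rem (pre.length) quals = quals ++ vs.map (fun v => fq n (cnt (pre ++ rem) v))
  | [], pre, rem, quals, _, _, _ => by simp [bGo]
  | v :: vs, pre, rem, quals, hsort, hvs, hcross => by
    have hremsort : rem.Pairwise (· ≤ ·) := (List.pairwise_append.1 hsort).2.1
    have hpresort : pre.Pairwise (· ≤ ·) := (List.pairwise_append.1 hsort).1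
    set t := rem.takeWhile (fun x => decide (x < v)) with ht
    set d := rem.dropWhile (fun x => decide (x < v)) with hd
    have htd : t ++ d = rem := List.takeWhile_append_dropWhile
    have hvvs : ∀ v' ∈ vs, v ≤ v' := (List.pairwise_cons.1 hvs).1
    -- count of pre: all < v
    have hpre_lt : ∀ p ∈ pre, p < v := fun p hp => hcross p hp v (List.mem_cons_self)
    have hcnt_pre : pre.countP (fun x => decide (x < v)) = pre.length :=
      List.countP_eq_length.2 (fun a ha => by simpa using hpre_lt a ha)
    have ht_lt : ∀ a ∈ t, a < v := by
      intro a ha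
      have h2 := @List.mem_takeWhile_imp Int (fun x => decide (x < v)) rem a (ht ▸ ha)
      simpa using h2
    have hcnt_t : t.countP (fun x => decide (x < v)) = t.length :=
      List.countP_eq_length.2 (fun a ha => by simpa using ht_lt a ha)
    have hcnt_d : d.countP (fun x => decide (x < v)) = 0 := countP_dropWhile_zero v rem hremsort
    have hcnt : cnt (pre ++ rem) v = pre.length + t.length := by
      unfold cnt
      rw [List.countP_append, hcnt_pre, ← htd, List.countP_append, hcnt_t, hcnt_d]
      omega
    have hadv : bAdvance v rem (pre.length : Int) = (d, ((pre ++ t).length : Int)) := by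
      rw [bAdvance_spec]; simp [← ht, ← hd]
    have hlist : (pre ++ t) ++ d = pre ++ rem := by rw [List.append_assoc, htd]
    have ihcross : ∀ p ∈ pre ++ t, ∀ v' ∈ vs, p < v' := by
      intro p hp v' hv'
      rcases List.mem_append.1 hp with hp | hp
      · exact lt_of_lt_of_le (hcross p hp v (List.mem_cons_self)) (hvvs v' hv')
      · exact lt_of_lt_of_le (ht_lt p hp) (hvvs v' hv')
    have ih := bGo_spec n vs (pre ++ t) d (quals ++ [min ((pre ++ t).length : Int) (n - ((pre ++ t).length : Int))])
        (by rw [hlist]; exact hsort) (List.pairwise_cons.1 hvs).2 ihcross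
    rw [hlist] at ih
    simp only [bGo, hadv]
    rw [ih]
    have hval : min ((pre ++ t).length : Int) (n - ((pre ++ t).length : Int)) = fq n (cnt (pre ++ rem) v) := by
      rw [hcnt]; simp [fq]
    rw [hval]
    simp

-- ===== A side =====
def aspec (domain : List Int) : List Int → Int → Int → Int → List Int
  | [], gt, lt, dn => (domain.filter (fun i => decide (dn < i))).map (fun _ => min gt lt)
  | x :: rest, gt, lt, dn =>
      (domain.filter (fun i => decide (dn < i) && decide (i ≤ x))).map (fun _ => min gt lt)
        ++ aspec domain rest (gt - 1) (lt + 1) x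

theorem aLoop_spec (domain : List Int) : ∀ (que : List Int) (gt lt dn : Int) (quals : List (List Int)),
    ((aLoop domain que gt lt dn quals).1 ++
      [(domain.filter (fun i => decide ((aLoop domain que gt lt dn quals).2.2.2 < i))).map
        (fun _ => min (aLoop domain que gt lt dn quals).2.1 (aLoop domain que gt lt dn quals).2.2.1)]).flatten
    = quals.flatten ++ aspec domain que gt lt dn
  | [], gt, lt, dn, quals => by simp [aLoop, aspec]; rfl
  | x :: rest, gt, lt, dn, quals => by
    simp only [aLoop]
    exact (aLoop_spec domain rest (gt - 1) (lt + 1) x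
      (quals ++ [(domain.filter (fun i => decide (dn < i) && decide (i ≤ x))).map (fun _ => min gt lt)])).trans
      (by simp [aspec])

theorem cnt_le_of_le (pre : List Int) (x : Int) (rest : List Int) (v : Int)
    (hcross : ∀ y ∈ x :: rest, x ≤ y) (hvx : v ≤ x) :
    cnt (pre ++ x :: rest) v ≤ pre.length := by
  unfold cnt
  rw [List.countP_append]
  have h0 : (x :: rest).countP (fun y => decide (y < v)) = 0 := by
    apply List.countP_eq_zero.2
    intro a ha
    have := hcross a ha
    simp; omega
  rw [h0]
  simpa using List.countP_le_length (l := pre)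

theorem cnt_ge_of_gt (pre : List Int) (x : Int) (rest : List Int) (v : Int)
    (hpre : ∀ p ∈ pre, p ≤ x) (hvx : x < v) :
    pre.length + 1 ≤ cnt (pre ++ x :: rest) v := by
  unfold cnt
  rw [List.countP_append]
  have h1 : pre.countP (fun y => decide (y < v)) = pre.length :=
    List.countP_eq_length.2 (fun a ha => by have := hpre a ha; simp; omega)
  have h2 : 1 ≤ (x :: rest).countP (fun y => decide (y < v)) := by
    rw [List.countP_cons]
    simp [hvx]
  omega

theorem aspec_eq (domain : List Int) : ∀ (que pre : List Int) (dn : Int),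
    (pre ++ que).Pairwise (· ≤ ·) →
    (∀ v ∈ domain, dn < v ↔ pre.length ≤ cnt (pre ++ que) v) →
    aspec domain que (que.length : Int) (pre.length : Int) dn
      = (ksOf domain (pre ++ que) pre.length (que.length + 1)).map (fq ((pre ++ que).length : Int))
  | [], pre, dn, hsort, hdn => by
    simp only [List.append_nil] at hdn ⊢
    have hfil : ∀ v ∈ domain, (decide (dn < v)) = (cnt pre v == pre.length) := by
      intro v hv
      have hle : cnt pre v ≤ pre.length := by
        unfold cnt; exact List.countP_le_length
      have hiff := hdn v hv
      by_cases h : dn < v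
      · have := hiff.1 h; simp [h]; omega
      · have : ¬ pre.length ≤ cnt pre v := fun hc => h (hiff.2 hc)
        simp [h]; omega
    simp only [aspec]
    rw [List.filter_congr hfil, List.map_const']
    simp only [ksOf, List.length_nil, Nat.zero_add, List.range'_one, List.flatMap_cons,
      List.flatMap_nil, List.append_nil, List.map_replicate]
    congr 1
    simp only [fq]
    push_cast
    omega
  | x :: rest, pre, dn, hsort, hdn => by
    have hpre_le : ∀ p ∈ pre, p ≤ x := by
      intro p hp
      exact (List.pairwise_append.1 hsort).2.2 p hp x (List.mem_cons_self)
    have hque : ∀ y ∈ x :: rest, x ≤ y := by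
      intro y hy
      rcases List.mem_cons.1 hy with rfl | hy
      · exact le_refl _
      · exact List.rel_of_pairwise_cons (List.pairwise_append.1 hsort).2.1 hy
    -- bucket condition
    have hfil : ∀ v ∈ domain,
        (decide (dn < v) && decide (v ≤ x)) = (cnt (pre ++ x :: rest) v == pre.length) := by
      intro v hv
      have hiff := hdn v hv
      by_cases h1 : v ≤ x
      · have hle := cnt_le_of_le pre x rest v hque h1
        by_cases h2 : dn < v
        · have := hiff.1 h2
          simp [h1, h2]; omega
        · have : ¬ pre.length ≤ cnt (pre ++ x :: rest) v := fun hc => h2 (hiff.2 hc)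
          simp [h1, h2]; omega
      · have hge := cnt_ge_of_gt pre x rest v hpre_le (by omega)
        have h2 : dn < v := hiff.2 (by omega)
        simp [h1, h2]; omega
    -- new invariant for dn' = x
    have hdn' : ∀ v ∈ domain, x < v ↔ (pre ++ [x]).length ≤ cnt ((pre ++ [x]) ++ rest) v := by
      intro v hv
      have hl : (pre ++ [x]) ++ rest = pre ++ x :: rest := by simp
      rw [hl]
      simp only [List.length_append, List.length_cons, List.length_nil]
      constructor
      · intro h; have := cnt_ge_of_gt pre x rest v hpre_le h; omega
      · intro h
        by_contra hc
        have := cnt_le_of_le pre x rest v hque (by omega)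
        omega
    have hsort' : ((pre ++ [x]) ++ rest).Pairwise (· ≤ ·) := by
      have hl : (pre ++ [x]) ++ rest = pre ++ x :: rest := by simp
      rw [hl]; exact hsort
    have ih := aspec_eq domain rest (pre ++ [x]) x hsort' hdn'
    have hl : (pre ++ [x]) ++ rest = pre ++ x :: rest := by simp
    rw [hl] at ih
    simp only [List.length_append, List.length_cons, List.length_nil] at ih
    simp only [aspec]
    rw [List.filter_congr hfil, List.map_const']
    have harith1 : ((x :: rest).length : Int) - 1 = (rest.length : Int) := by simp
    have harith2 : ((pre.length : Int)) + 1 = ((pre.length + 1 : Nat) : Int) := by push_cast; ring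
    simp only [Nat.zero_add] at ih
    rw [harith1, harith2, ih]
    -- unfold one step of ksOf on the right
    have hks : ksOf domain (pre ++ x :: rest) pre.length ((x :: rest).length + 1)
        = List.replicate ((domain.filter (fun v => cnt (pre ++ x :: rest) v == pre.length)).length) pre.length
          ++ ksOf domain (pre ++ x :: rest) (pre.length + 1) (rest.length + 1) := by
      unfold ksOf
      rw [show (x :: rest).length + 1 = (rest.length + 1) + 1 by simp]
      rw [List.range'_succ]
      simp
    rw [hks]
    simp only [List.map_append, List.map_replicate]
    have hn : (((pre ++ x :: rest).length : Nat) : Int) = ((pre.length + (rest.length + 1) : Nat) : Int) := by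
      simp
    rw [hn]
    congr 2
    simp only [fq]
    push_cast
    omega

-- ===== bridge: A's bucket order = B's sorted-domain order =====
theorem count_ksOf (domain sd : List Int) : ∀ (b a c : Nat),
    (ksOf domain sd a b).count c =
      if a ≤ c ∧ c < a + b then (domain.filter (fun v => cnt sd v == c)).length else 0
  | 0, a, c => by simp [ksOf]
  | b + 1, a, c => by
    unfold ksOf
    rw [List.range'_succ]
    simp only [List.flatMap_cons, List.count_append, List.count_replicate]
    have ih := count_ksOf domain sd b (a + 1) c
    unfold ksOf at ih
    rw [ih]
    by_cases h : c = a
    · subst h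
      have h2 : ¬ (c + 1 ≤ c ∧ c < c + 1 + b) := by omega
      have h3 : c ≤ c ∧ c < c + (b + 1) := by omega
      rw [if_neg h2, if_pos h3]
      simp
    · rw [if_neg (by simpa using Ne.symm h)]
      split_ifs with h1 h2 <;> omega
theorem mem_ksOf_lb (domain sd : List Int) : ∀ (b a x : Nat), x ∈ ksOf domain sd a b → a ≤ x
  | 0, a, x => by simp [ksOf]
  | b + 1, a, x => by
    unfold ksOf
    rw [List.range'_succ]
    simp only [List.flatMap_cons, List.mem_append, List.mem_replicate]
    rintro (⟨-, rfl⟩ | h)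
    · exact le_refl _
    · have := mem_ksOf_lb domain sd b (a + 1) x h
      omega

theorem ksOf_pairwise (domain sd : List Int) : ∀ (b a : Nat), (ksOf domain sd a b).Pairwise (· ≤ ·)
  | 0, a => by simp [ksOf]
  | b + 1, a => by
    unfold ksOf
    rw [List.range'_succ]
    simp only [List.flatMap_cons]
    apply List.pairwise_append.2
    refine ⟨List.pairwise_replicate.2 (by simp), ksOf_pairwise domain sd b (a + 1), ?_⟩
    intro x hx y hy
    have hx' : x = a := (List.mem_replicate.1 hx).2
    have hy' : a + 1 ≤ y := mem_ksOf_lb domain sd b (a + 1) y hy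
    omega

theorem cnt_mono (sd : List Int) (u v : Int) (h : u ≤ v) : cnt sd u ≤ cnt sd v := by
  unfold cnt
  apply List.countP_mono_left
  intro a _ ha
  simp at ha ⊢
  omega


theorem ks_bridge (domain sd : List Int) :
    ksOf domain sd 0 (sd.length + 1)
      = (PySem.List.sorted domain (fun x => x) false).map (fun v => cnt sd v) := by
  apply List.Perm.eq_of_pairwise (fun a b _ _ h1 h2 => Nat.le_antisymm h1 h2)
    (ksOf_pairwise domain sd _ _)
  · apply List.pairwise_map.2
    apply List.Pairwise.imp ?_ (PySem.List.sorted_pairwise domain (fun x => x))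
    intro a b hab
    exact cnt_mono sd a b hab
  · apply List.perm_iff_count.2
    intro c
    rw [count_ksOf]
    have hmapcount : ((PySem.List.sorted domain (fun x => x) false).map (fun v => cnt sd v)).count c
        = (domain.filter (fun v => cnt sd v == c)).length := by
      rw [List.count_eq_countP, List.countP_map]
      rw [(PySem.List.sorted_perm domain (fun x => x) false).countP_eq]
      rw [List.countP_eq_length_filter]
      rfl
    rw [hmapcount]
    by_cases h : c < sd.length + 1
    · rw [if_pos (by omega)]
    · rw [if_neg (by omega)]
      have hnil : domain.filter (fun v => cnt sd v == c) = [] := by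
        apply List.filter_eq_nil_iff.2
        intro v _
        have : cnt sd v ≤ sd.length := by unfold cnt; exact List.countP_le_length
        simp
        omega
      rw [hnil]
      rfl


theorem alt_eq (data domain : List Int) :
    bulk_quality_minmax_alt data domain
      = (PySem.List.sorted domain (fun x => x) false).map
          (fun v => fq (((PySem.List.sorted data (fun x => x) false).length : Nat) : Int)
            (cnt (PySem.List.sorted data (fun x => x) false) v)) := by
  unfold bulk_quality_minmax_alt
  have h := bGo_spec (((PySem.List.sorted data (fun x => x) false).length : Nat) : Int)
    (PySem.List.sorted domain (fun x => x) false) [] (PySem.List.sorted data (fun x => x) false) []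
    (by simpa using PySem.List.sorted_pairwise data (fun x => x))
    (PySem.List.sorted_pairwise domain (fun x => x))
    (by simp)
  simpa using h

theorem a_eq (data domain : List Int) (m : Int)
    (hm : PySem.List.min? domain (fun x => x) = some m) :
    bulk_quality_minmax data domain
      = (ksOf domain (PySem.List.sorted data (fun x => x) false) 0
          ((PySem.List.sorted data (fun x => x) false).length + 1)).map
          (fq (((PySem.List.sorted data (fun x => x) false).length : Nat) : Int)) := by
  unfold bulk_quality_minmax
  simp only [hm]
  have h1 := aLoop_spec domain (PySem.List.sorted data (fun x => x) false)
    ((data.length : Nat) : Int) 0 (m - 1) []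
  have h2 := aspec_eq domain (PySem.List.sorted data (fun x => x) false) [] (m - 1)
    (by simpa using PySem.List.sorted_pairwise data (fun x => x))
    (by
      intro v hv
      constructor
      · intro _; exact Nat.zero_le _
      · intro _
        have := PySem.List.min?_isMin hm v hv
        omega)
  simp only [List.nil_append, List.length_nil, Nat.cast_zero] at h2
  rw [PySem.List.length_sorted] at h2
  simp only [List.flatten_nil, List.nil_append] at h1
  rw [PySem.List.length_sorted]
  exact h1.trans h2

theorem final_eq (data domain : List Int) (hne : domain ≠ []) :
    bulk_quality_minmax data domain = bulk_quality_minmax_alt data domain := by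
  obtain ⟨m, hm⟩ : ∃ m, PySem.List.min? domain (fun x => x) = some m := by
    cases h : PySem.List.min? domain (fun x => x) with
    | none => exact absurd (PySem.List.min?_eq_none_iff _ _ |>.1 h) hne
    | some m => exact ⟨m, rfl⟩
  rw [a_eq data domain m hm, alt_eq, ks_bridge, List.map_map]
  rfl


-- ===== VERDICT (by name: the statement is the Claim_ definition above) =====
theorem bulk_quality_minmax_spec : Claim_equal_bulk_quality_minmax := by
  intro data domain _ hpre
  unfold Spec_bulk_quality_minmax
  exact final_eq data domain hpre
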